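-- pv_equiv track=rewrite | github.com/Goosang-Yu/CML_VUS | SupplementaryCode4/src/VarCalling.py | _find_indel_sequence
-- ===== SOURCE A (Python) =====
-- def _find_indel_sequence(aligned_seq:str, ref_seq:str, type:str='insertion') -> str:
--     """Aligned reads의 insertion/deletion pattern을 분석하는 handler.
--
--     Args:
--         aligned_seq (str): _description_
--         ref_seq (str): _description_
--         type (str): Select'insertion' or 'deletion'
--
--     Returns:
--         str: Sequence of insertion or deletion.
--     """
--
--     if   type == 'insertion': pass
--     elif type == 'deletion' :
--         aligned_seq, ref_seq = ref_seq, aligned_seq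
--     else:
--         raise ValueError('Not available type. Select "insertion" or "deletion"')
--
--     list_ins = []
--     isInsert = False
--
--     for a, b in zip(list(aligned_seq), list(ref_seq)):
--
--         if b == '-':
--             isInsert = True
--             list_ins.append(a)
--
--         else:
--             if isInsert == False: pass
--             else: break
--
--     return ''.join(list_ins)
-- ===== SOURCE B (Python) =====
-- def _find_indel_sequence(aligned_seq: str, ref_seq: str, type: str = 'insertion') -> str:
--     """Return the read bases of the first contiguous gap ('-') block of ref_seq."""
--     if type == 'insertion':
--         pass
--     elif type == 'deletion':
--         aligned_seq, ref_seq = ref_seq, aligned_seq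
--     else:
--         raise ValueError('Not available type. Select "insertion" or "deletion"')
--
--     start = ref_seq.find('-')
--     if start == -1:
--         return ''
--     end = start
--     while end < len(ref_seq) and ref_seq[end] == '-':
--         end += 1
--     return aligned_seq[start:end]
-- ===== Notes on version B (the rewrite author's own statement) =====
-- stated objective: simpler
-- what changed: Replaces A's stateful scan (accumulator list + isInsert flag + break) with a direct find-gap-start, advance-to-gap-end, slice formulation.
import Mathlib
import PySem

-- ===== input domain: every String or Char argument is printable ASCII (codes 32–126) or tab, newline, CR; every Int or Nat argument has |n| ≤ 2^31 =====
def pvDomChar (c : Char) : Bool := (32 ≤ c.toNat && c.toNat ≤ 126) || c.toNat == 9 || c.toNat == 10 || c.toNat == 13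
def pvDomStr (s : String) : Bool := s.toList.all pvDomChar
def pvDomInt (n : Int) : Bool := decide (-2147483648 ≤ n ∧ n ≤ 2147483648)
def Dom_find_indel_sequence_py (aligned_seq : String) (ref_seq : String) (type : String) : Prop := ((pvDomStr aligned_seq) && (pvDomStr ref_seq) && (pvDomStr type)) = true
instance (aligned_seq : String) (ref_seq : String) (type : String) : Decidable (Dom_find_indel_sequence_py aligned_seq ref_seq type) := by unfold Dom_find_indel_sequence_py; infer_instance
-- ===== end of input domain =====

-- B replaces A's stateful accumulator loop (isInsert flag + break) by find-the-gap-start then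
-- advance-to-gap-end and slice; same return value on both valid `type`s (objective: simpler).

-- ===== PORT A =====
-- the `for a, b in zip(...)` loop with state (list_ins, isInsert) and `break`
def pvJoinLoop : List (Char × Char) → List Char → Bool → List Char
  | [], acc, _ => acc
  | (a, b) :: rest, acc, isInsert =>
    if b = '-' then pvJoinLoop rest (acc ++ [a]) true
    else if isInsert = false then pvJoinLoop rest acc isInsert
    else acc

def find_indel_sequence_py (aligned_seq : String) (ref_seq : String) (type : String) : String :=
  if type = "insertion" then
    String.ofList (pvJoinLoop (aligned_seq.toList.zip ref_seq.toList) [] false)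
  else if type = "deletion" then
    String.ofList (pvJoinLoop (ref_seq.toList.zip aligned_seq.toList) [] false)
  else ""  -- Python raises ValueError here; excluded by Pre_

-- ===== PORT B =====
-- the `while end < len(ref_seq) and ref_seq[end] == '-': end += 1` loop of Source B
def pvAdvanceEnd (r : List Char) (e : Nat) : Nat :=
  if h : e < r.length then
    (if r[e] = '-' then pvAdvanceEnd r (e + 1) else e)
  else e
termination_by r.length - e

def find_indel_sequence_py_alt (aligned_seq : String) (ref_seq : String) (type : String) : String :=
  if type = "insertion" ∨ type = "deletion" then
    let a := if type = "deletion" then ref_seq.toList else aligned_seq.toList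
    let r := if type = "deletion" then aligned_seq.toList else ref_seq.toList
    let start := PySem.Chars.find r ['-']
    if start = -1 then ""
    else String.ofList (PySem.List.slice a (some start) (some (pvAdvanceEnd r start.toNat : Int)))
  else ""  -- ValueError in Python; excluded by Pre_

-- ===== PRECONDITION & SPEC =====
-- A raises ValueError for any other `type`; Pre_ admits exactly the two valid modes.
def Pre_find_indel_sequence_py (aligned_seq : String) (ref_seq : String) (type : String) : Prop :=
  type = "insertion" ∨ type = "deletion"
instance (aligned_seq : String) (ref_seq : String) (type : String) : Decidable (Pre_find_indel_sequence_py aligned_seq ref_seq type) := by unfold Pre_find_indel_sequence_py; infer_instance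

def pvWitness_find_indel_sequence_py : String × String × String := ("ACGT", "A--T", "insertion")

def Spec_find_indel_sequence_py (aligned_seq : String) (ref_seq : String) (type : String) (out : String) : Prop := out = find_indel_sequence_py_alt aligned_seq ref_seq type
instance (aligned_seq : String) (ref_seq : String) (type : String) (out : String) : Decidable (Spec_find_indel_sequence_py aligned_seq ref_seq type out) := by unfold Spec_find_indel_sequence_py; infer_instance

-- ===== CLAIM (what is proved, stated in full; the proofs are below) =====
def Claim_equal_find_indel_sequence_py : Prop := ∀ (aligned_seq : String) (ref_seq : String) (type : String), Dom_find_indel_sequence_py aligned_seq ref_seq type → Pre_find_indel_sequence_py aligned_seq ref_seq type → Spec_find_indel_sequence_py aligned_seq ref_seq type (find_indel_sequence_py aligned_seq ref_seq type)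

-- ===== LEMMAS AND PROOFS =====

-- [c] is a prefix of l.drop i iff l[i]? = some c
lemma pv_singleton_prefix_drop (l : List Char) (c : Char) (i : Nat) :
    ([c] <+: l.drop i) ↔ l[i]? = some c := by
  rw [← List.head?_drop]
  cases l.drop i with
  | nil => simp
  | cons x t => simp [List.cons_prefix_cons, eq_comm]

-- PySem's substring find, specialised to a single character
lemma pv_find_singleton (l : List Char) (c : Char) :
    PySem.Chars.find l [c] = if c ∈ l then ((l.findIdx (· = c) : Nat) : Int) else -1 := by
  by_cases hmem : c ∈ l
  · simp only [hmem, if_true]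
    have hinf : [c] <:+: l := by
      obtain ⟨s, t, rfl⟩ := List.append_of_mem hmem
      exact ⟨s, t, by simp⟩
    have hge : 0 ≤ PySem.Chars.find l [c] := (PySem.Chars.find_nonneg_iff l [c]).2 hinf
    obtain ⟨hpre, hmin⟩ := PySem.Chars.find_spec hge
    rw [pv_singleton_prefix_drop] at hpre
    have hlt : (PySem.Chars.find l [c]).toNat < l.length := by
      by_contra h
      simp [List.getElem?_eq_none (le_of_not_gt h)] at hpre
    have : l.findIdx (· = c) = (PySem.Chars.find l [c]).toNat := by
      rw [List.findIdx_eq hlt]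
      constructor
      · simp [List.getElem?_eq_getElem hlt] at hpre
        simp [hpre]
      · intro j hj
        have := hmin j hj
        rw [pv_singleton_prefix_drop] at this
        have hjlt : j < l.length := lt_trans hj hlt
        simp [List.getElem?_eq_getElem hjlt] at this
        simp [this]
    omega
  · simp only [hmem, if_false]
    rw [PySem.Chars.find_eq_neg_one_iff]
    intro hinf
    exact hmem (hinf.sublist.subset (by simp))

lemma pv_adv_succ (b : Char) (r : List Char) (e : Nat) :
    pvAdvanceEnd (b :: r) (e + 1) = pvAdvanceEnd r e + 1 := by
  fun_induction pvAdvanceEnd r e with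
  | case1 e h hc ih =>
    rw [pvAdvanceEnd]
    simp only [List.length_cons, List.getElem_cons_succ]
    rw [dif_pos (by omega), if_pos hc, ih]
  | case2 e h hc =>
    rw [pvAdvanceEnd]
    simp only [List.length_cons, List.getElem_cons_succ]
    rw [dif_pos (by omega), if_neg hc]
  | case3 e h =>
    rw [pvAdvanceEnd]
    rw [dif_neg (by simp; omega)]

lemma pv_adv_zero (r : List Char) :
    pvAdvanceEnd r 0 = (r.takeWhile (· = '-')).length := by
  induction r with
  | nil => rw [pvAdvanceEnd]; simp
  | cons b r ih =>
    rw [pvAdvanceEnd]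
    rw [dif_pos (by simp)]
    by_cases hb : b = '-'
    · simp only [List.getElem_cons_zero, if_pos hb, pv_adv_succ, ih]
      simp [hb]
    · simp only [List.getElem_cons_zero, if_neg hb]
      simp [hb]

-- phase 2 of A's loop: once isInsert is true, it collects while ref chars are '-'
lemma pv_loop_true (zs : List (Char × Char)) (acc : List Char) :
    pvJoinLoop zs acc true = acc ++ (zs.takeWhile (·.2 = '-')).map Prod.fst := by
  induction zs generalizing acc with
  | nil => simp [pvJoinLoop]
  | cons p zs ih =>
    obtain ⟨a, b⟩ := p
    by_cases hb : b = '-'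
    · simp [pvJoinLoop, hb, ih]
    · simp [pvJoinLoop, hb]

lemma pv_take_run (a r : List Char) :
    ((a.zip r).takeWhile (·.2 = '-')).map Prod.fst
      = a.take (r.takeWhile (· = '-')).length := by
  induction a generalizing r with
  | nil => simp
  | cons x a ih =>
    cases r with
    | nil => simp
    | cons b r =>
      by_cases hb : b = '-'
      · simp [List.zip_cons_cons, hb, ih]
      · simp [List.zip_cons_cons, hb]

-- the core equivalence, over char lists
lemma pv_core (a r : List Char) :
    pvJoinLoop (a.zip r) [] false
      = (if PySem.Chars.find r ['-'] = -1 then []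
         else PySem.List.slice a (some (PySem.Chars.find r ['-']))
                (some (pvAdvanceEnd r (PySem.Chars.find r ['-']).toNat : Int))) := by
  induction r generalizing a with
  | nil =>
    have : PySem.Chars.find ([] : List Char) ['-'] = -1 := by
      rw [pv_find_singleton]; simp
    simp [this, List.zip_nil_right, pvJoinLoop]
  | cons b r ih =>
    by_cases hb : b = '-'
    · -- gap starts at index 0
      have hf : PySem.Chars.find (b :: r) ['-'] = 0 := by
        rw [pv_find_singleton]; simp [hb, List.findIdx_cons]
      rw [hf]
      simp only [Int.toNat_zero]
      have he : pvAdvanceEnd (b :: r) 0 = (r.takeWhile (· = '-')).length + 1 := by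
        rw [pv_adv_zero]; simp [hb]
      rw [he]
      rw [if_neg (by decide : ¬ ((0:Int) = -1))]
      have hslice : PySem.List.slice a (some (0 : Int))
          (some (((r.takeWhile (· = '-')).length + 1 : Nat) : Int))
          = a.take ((r.takeWhile (· = '-')).length + 1) := by
        have := PySem.List.slice_natCast a 0 ((r.takeWhile (· = '-')).length + 1)
        simpa using this
      rw [hslice]
      cases a with
      | nil => simp [pvJoinLoop]
      | cons x a =>
        have hL : pvJoinLoop ((x :: a).zip (b :: r)) [] false
            = x :: ((a.zip r).takeWhile (·.2 = '-')).map Prod.fst := by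
          simp [List.zip_cons_cons, pvJoinLoop, hb, pv_loop_true]
        rw [hL, pv_take_run]
        simp [List.take_succ_cons]
    · -- no gap at the head: both sides step to (a.tail, r)
      have hstep : ∀ (a : List Char), pvJoinLoop (a.zip (b :: r)) [] false
          = pvJoinLoop (a.tail.zip r) [] false := by
        intro a
        cases a with
        | nil => simp [pvJoinLoop]
        | cons x a => simp [List.zip_cons_cons, pvJoinLoop, hb]
      rw [hstep, ih a.tail]
      by_cases hmem : '-' ∈ r
      · have hf : PySem.Chars.find (b :: r) ['-']
            = ((r.findIdx (· = '-') : Nat) : Int) + 1 := by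
          rw [pv_find_singleton]
          simp [List.mem_cons, hmem, hb, List.findIdx_cons]
        have hf' : PySem.Chars.find r ['-'] = ((r.findIdx (· = '-') : Nat) : Int) := by
          rw [pv_find_singleton]; simp [hmem]
        set k := r.findIdx (· = '-') with hk
        have h1 : PySem.Chars.find (b :: r) ['-'] ≠ -1 := by rw [hf]; omega
        have h2 : PySem.Chars.find r ['-'] ≠ -1 := by rw [hf']; omega
        rw [if_neg h1, if_neg h2, hf, hf']
        have ht1 : (((k : Nat) : Int) + 1).toNat = k + 1 := by omega
        have ht2 : (((k : Nat) : Int)).toNat = k := by omega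
        rw [ht1, ht2, pv_adv_succ]
        have hs1 := PySem.List.slice_natCast a (k + 1) (pvAdvanceEnd r k + 1)
        have hs2 := PySem.List.slice_natCast a.tail k (pvAdvanceEnd r k)
        push_cast
        rw [show ((k : Int) + 1) = (((k + 1 : Nat) : Int)) by push_cast; ring,
            show ((pvAdvanceEnd r k : Int) + 1) = (((pvAdvanceEnd r k + 1 : Nat) : Int)) by push_cast; ring]
        rw [hs1, hs2]
        rw [show a.drop (k + 1) = a.tail.drop k by rw [← List.drop_drop]; simp]
        congr 1
        omega
      · have hf : PySem.Chars.find (b :: r) ['-'] = -1 := by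
          rw [pv_find_singleton]; simp [List.mem_cons, hmem, Ne.symm hb]
        have hf' : PySem.Chars.find r ['-'] = -1 := by
          rw [pv_find_singleton]; simp [hmem]
        simp [hf, hf']

-- ===== VERDICT (by name: the statement is the Claim_ definition above) =====
theorem find_indel_sequence_py_spec : Claim_equal_find_indel_sequence_py := by
  intro aligned_seq ref_seq type _ hpre
  unfold Spec_find_indel_sequence_py find_indel_sequence_py find_indel_sequence_py_alt
  rcases hpre with h | h
  · subst h
    simp only [String.reduceEq, reduceIte]
    rw [pv_core]
    split <;> rfl
  · subst h
    simp only [String.reduceEq, reduceIte]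
    rw [pv_core]
    split <;> rfl
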